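-- pv_equiv track=rewrite | github.com/pypi-data/pypi-mirror-330 | packages/simplify-vcd/simplify_vcd-1.0.0-py3-none-any.whl/simplify_vcd/vcd_file.py | strip_headers
-- ===== SOURCE A (Python) =====
-- def strip_headers(vcd_data: list[str]) -> list[str]:
--     """
--     Removes the header lines from a VCD file's data.
--
--     Args:
--         vcd_data (list[str]): The lines of a VCD file as a list of strings.
--
--     Returns:
--         list[str]: The VCD data with headers removed. If only headers are present, an
--                    empty list is returned.
--     """
--     last_header_line = -1
--     for i, line in enumerate(vcd_data):
--         if line.strip().startswith("$"):
--             last_header_line = i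
--
--     if last_header_line == len(vcd_data) - 1:
--         return []
--
--     if last_header_line != -1:
--         return vcd_data[last_header_line + 1 :]
--
--     return vcd_data
-- ===== SOURCE B (Python) =====
-- def strip_headers(vcd_data: list[str]) -> list[str]:
--     """Backward scan: return everything after the last header line.
--
--     Scans from the end and stops at the first line that strip().startswith('$');
--     slicing after it covers all cases (empty tail, whole list when no header).
--     """
--     for j in range(len(vcd_data) - 1, -1, -1):
--         if vcd_data[j].strip().startswith("$"):
--             return vcd_data[j + 1:]
--     return vcd_data
-- ===== Notes on version B (the rewrite author's own statement) =====
-- stated objective: simpler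
-- what changed: Replaces the full forward pass that tracks the last header index plus a three-way branch by a backward scan that stops at the first header found from the end and returns the slice after it directly.
import Mathlib
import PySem

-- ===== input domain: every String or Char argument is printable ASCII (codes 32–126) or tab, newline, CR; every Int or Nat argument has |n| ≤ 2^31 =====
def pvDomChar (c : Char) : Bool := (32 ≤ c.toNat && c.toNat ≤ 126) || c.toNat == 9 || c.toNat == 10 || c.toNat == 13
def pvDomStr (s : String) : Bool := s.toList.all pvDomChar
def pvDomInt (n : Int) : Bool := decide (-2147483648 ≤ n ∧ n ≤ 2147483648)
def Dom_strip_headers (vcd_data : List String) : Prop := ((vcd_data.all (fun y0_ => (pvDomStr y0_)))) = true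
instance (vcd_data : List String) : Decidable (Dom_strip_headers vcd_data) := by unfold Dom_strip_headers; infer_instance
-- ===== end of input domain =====

-- ===== PORT A =====
-- B changes the scan: instead of a full forward pass tracking the last header index,
-- it scans backwards and stops at the first header line found from the end (objective: simpler).
-- line.strip().startswith("$")
def pvIsHdr (line : String) : Bool := PySem.Str.startswith (PySem.Str.strip line) "$"

-- last_header_line after the forward loop of A
def pvLastIdx (vcd_data : List String) : Int :=
  (PySem.List.enumerate vcd_data).foldl
    (fun acc p => if pvIsHdr p.2 then p.1 else acc) (-1)

def strip_headers (vcd_data : List String) : List String :=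
  let last_header_line := pvLastIdx vcd_data
  if last_header_line = (vcd_data.length : Int) - 1 then []
  else if last_header_line ≠ -1 then
    PySem.List.slice vcd_data (some (last_header_line + 1)) none
  else vcd_data

-- ===== PORT B =====
-- backward loop: j runs over range(len-1, -1, -1); `Nat.succ j` handles index j.
-- vcd_data[j] is in range (getD is exact); vcd_data[j+1:] with j+1 ≥ 0 is List.drop (exact).
def stripAltGo (vcd_data : List String) : Nat → List String
  | 0 => vcd_data
  | Nat.succ j =>
    if pvIsHdr (vcd_data.getD j "") then vcd_data.drop (j + 1)
    else stripAltGo vcd_data j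

def strip_headers_alt (vcd_data : List String) : List String :=
  stripAltGo vcd_data vcd_data.length

-- ===== PRECONDITION & SPEC =====
def Spec_strip_headers (vcd_data : List String) (out : List String) : Prop := out = strip_headers_alt vcd_data
instance (vcd_data : List String) (out : List String) : Decidable (Spec_strip_headers vcd_data out) := by unfold Spec_strip_headers; infer_instance

-- ===== CLAIM (what is proved, stated in full; the proofs are below) =====
def Claim_equal_strip_headers : Prop := ∀ (vcd_data : List String), Dom_strip_headers vcd_data → Spec_strip_headers vcd_data (strip_headers vcd_data)

-- ===== LEMMAS AND PROOFS =====

-- common closed form: everything after the last header line (the whole list if none)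
def pvSpec (l : List String) : List String :=
  if pvLastIdx l = -1 then l else l.drop (pvLastIdx l + 1).toNat

lemma pvLastIdx_append (l : List String) (x : String) :
    pvLastIdx (l ++ [x]) = if pvIsHdr x then (l.length : Int) else pvLastIdx l := by
  simp [pvLastIdx, PySem.List.enumerate_append, List.foldl_append, PySem.List.enumerate_cons]

lemma pvLastIdx_bounds (l : List String) :
    -1 ≤ pvLastIdx l ∧ pvLastIdx l < (l.length : Int) := by
  induction l using List.reverseRecOn with
  | nil => simp [pvLastIdx]
  | append_singleton l x ih =>
    rw [pvLastIdx_append]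
    split <;> simp <;> omega

lemma strip_headers_eq_pvSpec (l : List String) : strip_headers l = pvSpec l := by
  have hb := pvLastIdx_bounds l
  rw [strip_headers, pvSpec]
  by_cases h1 : pvLastIdx l = (l.length : Int) - 1
  · rw [if_pos h1]
    by_cases hm : pvLastIdx l = -1
    · have hlen : l.length = 0 := by omega
      rw [if_pos hm]
      exact (List.eq_nil_of_length_eq_zero hlen).symm
    · rw [if_neg hm]
      have : (pvLastIdx l + 1).toNat = l.length := by omega
      rw [this, List.drop_length]
  · rw [if_neg h1]
    by_cases hm : pvLastIdx l = -1
    · rw [if_neg (by simp [hm]), if_pos hm]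
    · rw [if_pos hm, if_neg hm,
        PySem.List.slice_from l (by omega : (0:Int) ≤ pvLastIdx l + 1)]

lemma stripAltGo_append (l : List String) (x : String) (n : Nat) (hn : n ≤ l.length) :
    stripAltGo (l ++ [x]) n = stripAltGo l n ++ [x] := by
  induction n with
  | zero => simp [stripAltGo]
  | succ j ih =>
    have hj : j < l.length := by omega
    rw [stripAltGo, stripAltGo, List.getD_append _ _ _ _ hj]
    split
    · rw [List.drop_append_of_le_length (by omega)]
    · exact ih (by omega)

lemma strip_headers_alt_eq_pvSpec (l : List String) : strip_headers_alt l = pvSpec l := by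
  induction l using List.reverseRecOn with
  | nil => simp [strip_headers_alt, stripAltGo, pvSpec, pvLastIdx]
  | append_singleton l x ih =>
    have hb := pvLastIdx_bounds l
    have hget : (l ++ [x]).getD l.length "" = x := by
      simp [List.getD]
    rw [strip_headers_alt, show (l ++ [x]).length = l.length + 1 from by simp,
      stripAltGo, hget]
    by_cases hx : pvIsHdr x
    · rw [if_pos hx, pvSpec, pvLastIdx_append, if_pos hx,
        if_neg (by omega : ¬ (l.length : Int) = -1)]
      have : ((l.length : Int) + 1).toNat = l.length + 1 := by omega
      rw [this]
    · rw [if_neg hx, stripAltGo_append l x l.length (le_refl _)]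
      rw [strip_headers_alt] at ih
      rw [ih, pvSpec, pvSpec, pvLastIdx_append, if_neg hx]
      by_cases hm : pvLastIdx l = -1
      · rw [if_pos hm, if_pos hm]
      · rw [if_neg hm, if_neg hm,
          List.drop_append_of_le_length (by omega : (pvLastIdx l + 1).toNat ≤ l.length)]

-- ===== VERDICT (by name: the statement is the Claim_ definition above) =====
theorem strip_headers_spec : Claim_equal_strip_headers := by
  intro vcd_data _
  unfold Spec_strip_headers
  rw [strip_headers_eq_pvSpec, strip_headers_alt_eq_pvSpec]
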